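-- pv_equiv track=rewrite | github.com/josephscola/pySIMS | MassSpectrumMonitor/mass_spectrum_monitor.py | read_isotope_name
-- ===== SOURCE A (Python) =====
-- def read_isotope_name(name):
--     elem = ''
--     int_mass_str = ''
--     inmass = True
--     for c in name:
--          if not c.isdigit () and not inmass :
--              elem += c
--          if not c.isdigit () and inmass:
--              inmass = not inmass
--              elem += c
--          if c.isdigit () and inmass :
--              int_mass_str += c
--          if c.isdigit () and not inmass :
--              elem += c
--     int_mass = int (int_mass_str)
--     return int_mass, elem
-- ===== SOURCE B (Python) =====
-- def read_isotope_name(name):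
--     i = 0
--     while i < len(name) and name[i].isdigit():
--         i += 1
--     return int(name[:i]), name[i:]
-- ===== Notes on version B (the rewrite author's own statement) =====
-- stated objective: simpler
-- what changed: B finds the length of the leading-digit prefix and slices the string into mass and element parts, instead of A's character-by-character accumulation into two strings steered by an 'inmass' flag and four if-branches.
-- outside the precondition, e.g. on read_isotope_name(''): A raises ValueError, B raises ValueError; on read_isotope_name('Li'): A raises ValueError, B raises ValueError
import Mathlib
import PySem

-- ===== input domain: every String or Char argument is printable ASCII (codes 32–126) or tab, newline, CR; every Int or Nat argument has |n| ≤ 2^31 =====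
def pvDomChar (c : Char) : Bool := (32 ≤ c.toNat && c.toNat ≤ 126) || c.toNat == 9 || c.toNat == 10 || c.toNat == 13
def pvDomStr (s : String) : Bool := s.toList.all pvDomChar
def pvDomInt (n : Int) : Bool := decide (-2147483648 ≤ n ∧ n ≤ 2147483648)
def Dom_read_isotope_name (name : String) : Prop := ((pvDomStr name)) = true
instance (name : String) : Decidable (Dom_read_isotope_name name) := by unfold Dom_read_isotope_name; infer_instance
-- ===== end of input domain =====

-- B replaces A's four-branch 'inmass'-flag accumulation by slicing the string at the end of the
-- leading-digit prefix (objective: simpler).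

-- ===== PORT A =====
-- one iteration of A's for-loop: state = (elem, int_mass_str, inmass), the four ifs in order
def readIsoStepA (st : List Char × List Char × Bool) (c : Char) : List Char × List Char × Bool :=
  let elem := st.1
  let mass := st.2.1
  let inmass := st.2.2
  let elem := if !(PySem.Chars.isdigit c) && !inmass then elem ++ [c] else elem
  let p := if !(PySem.Chars.isdigit c) && inmass then (!inmass, elem ++ [c]) else (inmass, elem)
  let inmass := p.1
  let elem := p.2
  let mass := if PySem.Chars.isdigit c && inmass then mass ++ [c] else mass
  let elem := if PySem.Chars.isdigit c && !inmass then elem ++ [c] else elem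
  (elem, mass, inmass)

def read_isotope_name (name : String) : Int × String :=
  let st := name.toList.foldl readIsoStepA ([], [], true)
  -- int(int_mass_str): raises (none) when the accumulated digit string is empty; excluded by Pre_
  ((PySem.Int.ofChars? st.2.1).getD 0, String.ofList st.1)

-- ===== PORT B =====
def read_isotope_name_alt (name : String) : Int × String :=
  let cs := name.toList
  -- the while loop: i = length of the leading run of digit characters
  let i := (cs.takeWhile PySem.Chars.isdigit).length
  ((PySem.Int.ofChars? (cs.take i)).getD 0, String.ofList (cs.drop i))

-- ===== PRECONDITION & SPEC =====
-- Pre_ excludes exactly the inputs where Python A raises ValueError: names with no leading digit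
-- (int('') on the empty accumulated mass string); B raises the same ValueError there.
def Pre_read_isotope_name (name : String) : Prop :=
  PySem.Chars.isdigit (name.toList.headD ' ') = true
instance (name : String) : Decidable (Pre_read_isotope_name name) := by unfold Pre_read_isotope_name; infer_instance

def pvWitness_read_isotope_name : String := "7Li"

def Spec_read_isotope_name (name : String) (out : Int × String) : Prop := out = read_isotope_name_alt name
instance (name : String) (out : Int × String) : Decidable (Spec_read_isotope_name name out) := by unfold Spec_read_isotope_name; infer_instance

-- ===== CLAIM (what is proved, stated in full; the proofs are below) =====
def Claim_equal_read_isotope_name : Prop := ∀ (name : String), Dom_read_isotope_name name → Pre_read_isotope_name name → Spec_read_isotope_name name (read_isotope_name name)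

-- ===== LEMMAS AND PROOFS =====

-- once inmass is false, every remaining character is appended to elem
theorem readIso_foldl_false (cs : List Char) (elem mass : List Char) :
    cs.foldl readIsoStepA (elem, mass, false) = (elem ++ cs, mass, false) := by
  induction cs generalizing elem with
  | nil => simp
  | cons c cs ih =>
      simp only [List.foldl_cons, readIsoStepA]
      by_cases h : PySem.Chars.isdigit c = true <;>
        simp [h, ih, List.append_assoc]

-- while inmass is true: digits go to mass until the first non-digit, the rest to elem
theorem readIso_foldl_true (cs : List Char) (elem mass : List Char) :
    cs.foldl readIsoStepA (elem, mass, true) =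
      (elem ++ cs.dropWhile PySem.Chars.isdigit,
       mass ++ cs.takeWhile PySem.Chars.isdigit,
       cs.all PySem.Chars.isdigit) := by
  induction cs generalizing elem mass with
  | nil => simp
  | cons c cs ih =>
      simp only [List.foldl_cons, readIsoStepA]
      by_cases h : PySem.Chars.isdigit c = true
      · simp [h, ih]
      · 
        simp [h, readIso_foldl_false, List.append_assoc]

-- taking the length of the leading-digit run is the run itself; dropping it is the remainder
theorem take_len_takeWhile {α : Type} (p : α → Bool) (l : List α) :
    l.take (l.takeWhile p).length = l.takeWhile p := by
  induction l with
  | nil => simp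
  | cons a l ih =>
      by_cases h : p a = true <;> simp [h, ih]

theorem drop_len_takeWhile {α : Type} (p : α → Bool) (l : List α) :
    l.drop (l.takeWhile p).length = l.dropWhile p := by
  induction l with
  | nil => simp
  | cons a l ih =>
      by_cases h : p a = true <;> simp [h, ih]

-- ===== VERDICT (by name: the statement is the Claim_ definition above) =====
theorem read_isotope_name_spec : Claim_equal_read_isotope_name := by
  intro name _ _
  unfold Spec_read_isotope_name read_isotope_name read_isotope_name_alt
  simp [readIso_foldl_true, take_len_takeWhile, drop_len_takeWhile]
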